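-- pv_equiv track=rewrite | github.com/Fenix-Okami/Tian-hanzi-deck | src/tian_hanzi/utils/pinyin_converter.py | numbered_to_accented
-- ===== SOURCE A (Python) =====
-- TONE_MARKS = {
--     'a': ['a', 'ā', 'á', 'ǎ', 'à'],
--     'e': ['e', 'ē', 'é', 'ě', 'è'],
--     'i': ['i', 'ī', 'í', 'ǐ', 'ì'],
--     'o': ['o', 'ō', 'ó', 'ǒ', 'ò'],
--     'u': ['u', 'ū', 'ú', 'ǔ', 'ù'],
--     'ü': ['ü', 'ǖ', 'ǘ', 'ǚ', 'ǜ'],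
--     'A': ['A', 'Ā', 'Á', 'Ǎ', 'À'],
--     'E': ['E', 'Ē', 'É', 'Ě', 'È'],
--     'I': ['I', 'Ī', 'Í', 'Ǐ', 'Ì'],
--     'O': ['O', 'Ō', 'Ó', 'Ǒ', 'Ò'],
--     'U': ['U', 'Ū', 'Ú', 'Ǔ', 'Ù'],
--     'Ü': ['Ü', 'Ǖ', 'Ǘ', 'Ǚ', 'Ǜ'],
-- }
--
-- def numbered_to_accented(pinyin_str):
--     """
--     Convert numbered pinyin to accented pinyin.
--
--     Examples:
--         xue3 -> xuě
--         Zhong1 -> Zhōng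
--         xiao3 hai2 -> xiǎo hái
--         de5 -> de (tone 5/neutral has no mark)
--
--     Args:
--         pinyin_str: String with numbered pinyin (e.g., "xue3" or "xiao3 hai2")
--
--     Returns:
--         String with accented pinyin
--     """
--     if not pinyin_str:
--         return pinyin_str
--
--     # Handle multiple syllables separated by spaces
--     syllables = pinyin_str.split()
--     converted = []
--
--     for syllable in syllables:
--         # Extract tone number (last character if it's a digit)
--         if syllable and syllable[-1].isdigit():
--             tone = int(syllable[-1])
--             base = syllable[:-1]
--         else:
--             # No tone number, keep as is
--             converted.append(syllable)
--             continue
--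
--         # Tone 5 (neutral) has no mark
--         if tone == 5 or tone == 0:
--             converted.append(base)
--             continue
--
--         # Find which vowel gets the tone mark
--         # Priority: a, o, e, then last vowel
--         tone_position = -1
--
--         # Convert v to ü for proper handling
--         base_chars = list(base.replace('v', 'ü').replace('V', 'Ü'))
--
--         # Rule 1: 'a' or 'e' always get the tone
--         for i, char in enumerate(base_chars):
--             if char.lower() in ['a', 'e']:
--                 tone_position = i
--                 break
--
--         # Rule 2: If no 'a' or 'e', 'o' gets it
--         if tone_position == -1:
--             for i, char in enumerate(base_chars):
--                 if char.lower() == 'o':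
--                     tone_position = i
--                     break
--
--         # Rule 3: Otherwise the last vowel gets it
--         if tone_position == -1:
--             for i in range(len(base_chars) - 1, -1, -1):
--                 if base_chars[i].lower() in ['i', 'u', 'ü']:
--                     tone_position = i
--                     break
--
--         # Apply the tone mark
--         if tone_position != -1:
--             original_char = base_chars[tone_position]
--             if original_char in TONE_MARKS:
--                 base_chars[tone_position] = TONE_MARKS[original_char][tone]
--
--         converted.append(''.join(base_chars))
--
--     return ' '.join(converted)
-- ===== SOURCE B (Python) =====
-- TONE_MARKS = {
--     'a': ['a', 'ā', 'á', 'ǎ', 'à'],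
--     'e': ['e', 'ē', 'é', 'ě', 'è'],
--     'i': ['i', 'ī', 'í', 'ǐ', 'ì'],
--     'o': ['o', 'ō', 'ó', 'ǒ', 'ò'],
--     'u': ['u', 'ū', 'ú', 'ǔ', 'ù'],
--     'ü': ['ü', 'ǖ', 'ǘ', 'ǚ', 'ǜ'],
--     'A': ['A', 'Ā', 'Á', 'Ǎ', 'À'],
--     'E': ['E', 'Ē', 'É', 'Ě', 'È'],
--     'I': ['I', 'Ī', 'Í', 'Ǐ', 'Ì'],
--     'O': ['O', 'Ō', 'Ó', 'Ǒ', 'Ò'],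
--     'U': ['U', 'Ū', 'Ú', 'Ǔ', 'Ù'],
--     'Ü': ['Ü', 'Ǖ', 'Ǘ', 'Ǚ', 'Ǜ'],
-- }
--
--
-- def _tone_index(chars):
--     """Single left-to-right pass: first a/e, first o, last i/u/ü; priority a/e > o > last i/u/ü."""
--     first_ae = first_o = last_iuv = -1
--     for i, char in enumerate(chars):
--         low = char.lower()
--         if low in ('a', 'e'):
--             if first_ae == -1:
--                 first_ae = i
--         elif low == 'o':
--             if first_o == -1:
--                 first_o = i
--         elif low in ('i', 'u', 'ü'):
--             last_iuv = i
--     if first_ae != -1: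
--         return first_ae
--     if first_o != -1:
--         return first_o
--     return last_iuv
--
--
-- def _convert_syllable(syllable):
--     if not (syllable and syllable[-1].isdigit()):
--         return syllable
--     tone = int(syllable[-1])
--     base = syllable[:-1]
--     if tone == 5 or tone == 0:
--         return base
--     chars = list(base.replace('v', 'ü').replace('V', 'Ü'))
--     tp = _tone_index(chars)
--     if tp != -1 and chars[tp] in TONE_MARKS:
--         chars[tp] = TONE_MARKS[chars[tp]][tone]
--     return ''.join(chars)
--
--
-- def numbered_to_accented(pinyin_str):
--     """Convert numbered pinyin to accented pinyin (per-syllable helper, single-pass vowel selection)."""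
--     if not pinyin_str:
--         return pinyin_str
--     return ' '.join(_convert_syllable(s) for s in pinyin_str.split())
-- ===== Notes on version B (the rewrite author's own statement) =====
-- stated objective: alternative
-- what changed: The three separate vowel-scanning loops (first a/e, first o, reverse scan for last i/u/ü) are replaced by one left-to-right pass recording first-a/e, first-o and last-i/u/ü indices, and the per-syllable work is factored into helper functions instead of one inline loop body.
import Mathlib
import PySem

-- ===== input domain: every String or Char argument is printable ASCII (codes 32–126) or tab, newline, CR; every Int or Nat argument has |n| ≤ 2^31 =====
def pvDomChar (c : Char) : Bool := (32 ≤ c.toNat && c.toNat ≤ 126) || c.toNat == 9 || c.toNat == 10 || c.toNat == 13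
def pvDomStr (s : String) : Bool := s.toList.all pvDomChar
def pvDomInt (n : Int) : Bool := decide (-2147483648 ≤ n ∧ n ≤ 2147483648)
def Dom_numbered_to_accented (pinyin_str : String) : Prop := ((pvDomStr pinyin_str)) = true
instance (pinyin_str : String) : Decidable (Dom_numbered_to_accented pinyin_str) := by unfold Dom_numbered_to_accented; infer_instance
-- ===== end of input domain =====

-- B replaces A's three vowel-scanning loops by one single left-to-right pass (first a/e, first o,
-- last i/u/ü) and factors the per-syllable work into helpers: an alternative decomposition, same cost.

-- ===== PORT A =====

-- the module constant TONE_MARKS (dict of single-char keys); lookup = membership + indexing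
def pvToneMarks (c : Char) : Option (List Char) :=
  match c with
  | 'a' => some ['a', 'ā', 'á', 'ǎ', 'à']
  | 'e' => some ['e', 'ē', 'é', 'ě', 'è']
  | 'i' => some ['i', 'ī', 'í', 'ǐ', 'ì']
  | 'o' => some ['o', 'ō', 'ó', 'ǒ', 'ò']
  | 'u' => some ['u', 'ū', 'ú', 'ǔ', 'ù']
  | 'ü' => some ['ü', 'ǖ', 'ǘ', 'ǚ', 'ǜ']
  | 'A' => some ['A', 'Ā', 'Á', 'Ǎ', 'À']
  | 'E' => some ['E', 'Ē', 'É', 'Ě', 'È']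
  | 'I' => some ['I', 'Ī', 'Í', 'Ǐ', 'Ì']
  | 'O' => some ['O', 'Ō', 'Ó', 'Ǒ', 'Ò']
  | 'U' => some ['U', 'Ū', 'Ú', 'Ǔ', 'Ù']
  | 'Ü' => some ['Ü', 'Ǖ', 'Ǘ', 'Ǚ', 'Ǜ']
  | _ => none

-- 'for i, char in enumerate(base_chars): if p(char): tone_position = i; break' (tone_position starts at -1)
def pvScanA (p : Char → Bool) : List (Int × Char) → Int
  | [] => -1
  | (i, c) :: rest => if p c then i else pvScanA p rest

-- Rule 3: 'for i in range(len(base_chars)-1, -1, -1): if base_chars[i].lower() in [i,u,ü]: …; break',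
-- as the structural descending recursion on the index (k+1 visits index k first)
def pvRule3A (chars : List Char) : Nat → Int
  | 0 => -1
  | k + 1 =>
    if PySem.Chars.lowerChar (PySem.List.pyGetD chars (k : Int) ' ') ∈ (['i', 'u', 'ü'] : List Char)
    then (k : Int) else pvRule3A chars k

def numbered_to_accented (pinyin_str : String) : String :=
  if pinyin_str = "" then pinyin_str
  else
    let syllables := PySem.Chars.split₀ pinyin_str.toList
    let converted := syllables.foldl (fun (converted : List (List Char)) (syllable : List Char) =>
      if !syllable.isEmpty && PySem.Chars.isdigit (PySem.List.pyGetD syllable (-1) ' ') then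
        -- int(syllable[-1]) of an ASCII digit char is its value (exact on Dom)
        let tone : Int := ((PySem.List.pyGetD syllable (-1) '0').toNat : Int) - 48
        let base := PySem.List.slice syllable none (some (-1))
        if tone = 5 ∨ tone = 0 then converted ++ [base]
        else
          let base_chars := PySem.Chars.replace (PySem.Chars.replace base ['v'] ['ü']) ['V'] ['Ü']
          let tp1 := pvScanA (fun c => PySem.Chars.lowerChar c ∈ (['a', 'e'] : List Char))
                       (PySem.List.enumerate base_chars)
          let tp2 := if tp1 = -1 then
                       pvScanA (fun c => PySem.Chars.lowerChar c = 'o') (PySem.List.enumerate base_chars)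
                     else tp1
          let tp3 := if tp2 = -1 then pvRule3A base_chars base_chars.length else tp2
          let base_chars' :=
            if tp3 ≠ -1 then
              match pvToneMarks (PySem.List.pyGetD base_chars tp3 ' ') with
              | some marks => base_chars.set tp3.toNat (PySem.List.pyGetD marks tone ' ')
              | none => base_chars
            else base_chars
          converted ++ [base_chars']
      else converted ++ [syllable]) ([] : List (List Char))
    String.mk (PySem.Chars.join [' '] converted)

-- ===== PORT B =====

-- loop body of B's single pass: state (first_ae, first_o, last_iuv)
def pvStep (st : Int × Int × Int) (p : Int × Char) : Int × Int × Int :=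
  let low := PySem.Chars.lowerChar p.2
  if low = 'a' ∨ low = 'e' then (if st.1 = -1 then (p.1, st.2.1, st.2.2) else st)
  else if low = 'o' then (if st.2.1 = -1 then (st.1, p.1, st.2.2) else st)
  else if low = 'i' ∨ low = 'u' ∨ low = 'ü' then (st.1, st.2.1, p.1)
  else st

-- the three-way selection after B's pass
def pvSelect (st : Int × Int × Int) : Int :=
  if st.1 ≠ -1 then st.1
  else if st.2.1 ≠ -1 then st.2.1
  else st.2.2

def pvToneIndex (chars : List Char) : Int :=
  pvSelect ((PySem.List.enumerate chars).foldl pvStep (-1, -1, -1))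

def pvConvertSyllable (syllable : List Char) : List Char :=
  if !(!syllable.isEmpty && PySem.Chars.isdigit (PySem.List.pyGetD syllable (-1) ' ')) then syllable
  else
    let tone : Int := ((PySem.List.pyGetD syllable (-1) '0').toNat : Int) - 48
    let base := PySem.List.slice syllable none (some (-1))
    if tone = 5 ∨ tone = 0 then base
    else
      let chars := PySem.Chars.replace (PySem.Chars.replace base ['v'] ['ü']) ['V'] ['Ü']
      let tp := pvToneIndex chars
      if tp ≠ -1 then
        match pvToneMarks (PySem.List.pyGetD chars tp ' ') with
        | some marks => chars.set tp.toNat (PySem.List.pyGetD marks tone ' ')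
        | none => chars
      else chars

def numbered_to_accented_alt (pinyin_str : String) : String :=
  if pinyin_str = "" then pinyin_str
  else String.mk (PySem.Chars.join [' ']
         ((PySem.Chars.split₀ pinyin_str.toList).map pvConvertSyllable))

-- ===== PRECONDITION & SPEC =====

-- Pre_ excludes exactly the inputs on which A raises IndexError: a syllable whose trailing tone digit
-- is 6–9 while its base contains a marked vowel (then TONE_MARKS[ch][tone] indexes past the 5 entries).
def pvBadWord (w : List Char) : Bool :=
  match w.getLast? with
  | some c => decide (c ∈ (['6', '7', '8', '9'] : List Char)) &&
      w.dropLast.any (fun ch => decide (PySem.Chars.lowerChar ch ∈ (['a', 'e', 'i', 'o', 'u', 'v'] : List Char)))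
  | none => false

def Pre_numbered_to_accented (pinyin_str : String) : Prop :=
  ∀ w ∈ PySem.Chars.split₀ pinyin_str.toList, pvBadWord w = false
instance (pinyin_str : String) : Decidable (Pre_numbered_to_accented pinyin_str) := by
  unfold Pre_numbered_to_accented; infer_instance

def pvWitness_numbered_to_accented : String := "xue3 hai2"

def Spec_numbered_to_accented (pinyin_str : String) (out : String) : Prop := out = numbered_to_accented_alt pinyin_str
instance (pinyin_str : String) (out : String) : Decidable (Spec_numbered_to_accented pinyin_str out) := by
  unfold Spec_numbered_to_accented; infer_instance

-- ===== CLAIM (what is proved, stated in full; the proofs are below) =====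
def Claim_equal_numbered_to_accented : Prop := ∀ (pinyin_str : String), Dom_numbered_to_accented pinyin_str → Pre_numbered_to_accented pinyin_str → Spec_numbered_to_accented pinyin_str (numbered_to_accented pinyin_str)

-- ===== LEMMAS AND PROOFS =====

lemma pv_fold_fst : ∀ (l : List (Int × Char)) (st : Int × Int × Int), (∀ q ∈ l, 0 ≤ q.1) →
    (l.foldl pvStep st).1 =
      if st.1 = -1 then pvScanA (fun c => PySem.Chars.lowerChar c ∈ (['a', 'e'] : List Char)) l
      else st.1 := by
  intro l
  induction l with
  | nil => intro st h; simp [pvScanA]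
  | cons q rest ih =>
    rintro st h
    obtain ⟨i, c⟩ := q
    have hi : (0:Int) ≤ i := h (i, c) (by simp)
    have hrest : ∀ q ∈ rest, (0:Int) ≤ q.1 := fun q hq => h q (by simp [hq])
    simp only [List.foldl_cons, pvScanA]
    rw [ih _ hrest]
    by_cases h1 : PySem.Chars.lowerChar c = 'a' ∨ PySem.Chars.lowerChar c = 'e'
    · by_cases h2 : st.1 = -1 <;> simp [pvStep, h1, h2] <;> omega
    · have h1' : ¬ PySem.Chars.lowerChar c ∈ (['a', 'e'] : List Char) := by simpa using h1
      simp only [pvStep, h1', if_neg h1]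
      split_ifs <;> simp_all

lemma pv_fold_snd : ∀ (l : List (Int × Char)) (st : Int × Int × Int), (∀ q ∈ l, 0 ≤ q.1) →
    (l.foldl pvStep st).2.1 =
      if st.2.1 = -1 then pvScanA (fun c => decide (PySem.Chars.lowerChar c = 'o')) l
      else st.2.1 := by
  intro l
  induction l with
  | nil => intro st h; simp [pvScanA]
  | cons q rest ih =>
    rintro st h
    obtain ⟨i, c⟩ := q
    have hi : (0:Int) ≤ i := h (i, c) (by simp)
    have hrest : ∀ q ∈ rest, (0:Int) ≤ q.1 := fun q hq => h q (by simp [hq])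
    simp only [List.foldl_cons, pvScanA]
    rw [ih _ hrest]
    by_cases h1 : PySem.Chars.lowerChar c = 'a' ∨ PySem.Chars.lowerChar c = 'e'
    · have ho : ¬ PySem.Chars.lowerChar c = 'o' := by rcases h1 with h | h <;> simp [h]
      simp only [pvStep, if_pos h1, ho]
      split_ifs <;> simp_all
    · by_cases h2 : PySem.Chars.lowerChar c = 'o'
      · by_cases h3 : st.2.1 = -1 <;> simp [pvStep, h1, h2, h3] <;> omega
      · simp only [pvStep, if_neg h1, if_neg h2]
        split_ifs <;> simp_all

lemma pv_scan_append (p : Char → Bool) : ∀ (xs ys : List (Int × Char)), (∀ q ∈ xs, 0 ≤ q.1) →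
    pvScanA p (xs ++ ys) = if pvScanA p xs = -1 then pvScanA p ys else pvScanA p xs := by
  intro xs
  induction xs with
  | nil => intro ys h; simp [pvScanA]
  | cons q rest ih =>
    rintro ys h
    obtain ⟨i, c⟩ := q
    have hi : (0:Int) ≤ i := h (i, c) (by simp)
    have hrest : ∀ q ∈ rest, (0:Int) ≤ q.1 := fun q hq => h q (by simp [hq])
    simp only [List.cons_append, pvScanA]
    by_cases h1 : p c
    · simp only [if_pos h1]
      split_ifs <;> omega
    · simp only [if_neg h1]
      exact ih ys hrest

lemma pv_fold_thd : ∀ (l : List (Int × Char)) (st : Int × Int × Int), (∀ q ∈ l, 0 ≤ q.1) →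
    (l.foldl pvStep st).2.2 =
      if pvScanA (fun c => PySem.Chars.lowerChar c ∈ (['i', 'u', 'ü'] : List Char)) l.reverse = -1
      then st.2.2
      else pvScanA (fun c => PySem.Chars.lowerChar c ∈ (['i', 'u', 'ü'] : List Char)) l.reverse := by
  intro l
  induction l with
  | nil => intro st h; simp [pvScanA]
  | cons q rest ih =>
    rintro st h
    obtain ⟨i, c⟩ := q
    have hi : (0:Int) ≤ i := h (i, c) (by simp)
    have hrest : ∀ q ∈ rest, (0:Int) ≤ q.1 := fun q hq => h q (by simp [hq])
    have hrev : ∀ q ∈ rest.reverse, (0:Int) ≤ q.1 := fun q hq => hrest q (by simpa using hq)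
    simp only [List.foldl_cons, List.reverse_cons]
    rw [ih _ hrest, pv_scan_append _ _ _ hrev]
    by_cases h1 : PySem.Chars.lowerChar c = 'a' ∨ PySem.Chars.lowerChar c = 'e'
    · have hiu : ¬ PySem.Chars.lowerChar c ∈ (['i', 'u', 'ü'] : List Char) := by
        rcases h1 with h | h <;> simp [h]
      simp only [pvStep, if_pos h1, pvScanA, hiu]
      split_ifs <;> simp_all
    · by_cases h2 : PySem.Chars.lowerChar c = 'o'
      · have hiu : ¬ PySem.Chars.lowerChar c ∈ (['i', 'u', 'ü'] : List Char) := by simp [h2]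
        simp only [pvStep, if_neg h1, if_pos h2, pvScanA, hiu]
        split_ifs <;> simp_all
      · by_cases h3 : PySem.Chars.lowerChar c ∈ (['i', 'u', 'ü'] : List Char)
        · have h3' : PySem.Chars.lowerChar c = 'i' ∨ PySem.Chars.lowerChar c = 'u' ∨
              PySem.Chars.lowerChar c = 'ü' := by simpa using h3
          simp only [pvStep, if_neg h1, if_neg h2, if_pos h3', pvScanA, h3]
          split_ifs <;> simp_all
        · have h3' : ¬ (PySem.Chars.lowerChar c = 'i' ∨ PySem.Chars.lowerChar c = 'u' ∨
              PySem.Chars.lowerChar c = 'ü') := by simpa using h3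
          simp only [pvStep, if_neg h1, if_neg h2, if_neg h3', pvScanA, h3]
          split_ifs <;> simp_all

lemma pv_enum_nonneg (xs : List Char) : ∀ q ∈ PySem.List.enumerate xs 0, (0:Int) ≤ q.1 := by
  intro q hq
  rw [PySem.List.mem_enumerate_iff] at hq
  obtain ⟨k, hk, rfl⟩ := hq
  simp

lemma pv_rule3_prefix : ∀ (k : Nat) (xs ys : List Char), k ≤ xs.length →
    pvRule3A (xs ++ ys) k = pvRule3A xs k := by
  intro k
  induction k with
  | zero => intro xs ys h; rfl
  | succ k ih =>
    intro xs ys h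
    have hk : k < xs.length := by omega
    simp only [pvRule3A]
    have e1 : PySem.List.pyGetD (xs ++ ys) (k : Int) ' ' = xs[k] := by
      rw [PySem.List.pyGetD_eq_getElem (xs ++ ys) ' ' (by omega) (by simp; omega)]
      simp only [Int.toNat_natCast]
      exact List.getElem_append_left hk
    have e2 : PySem.List.pyGetD xs (k : Int) ' ' = xs[k] := by
      rw [PySem.List.pyGetD_eq_getElem xs ' ' (by omega) (by simp; omega)]
      simp only [Int.toNat_natCast]
    simp only [e1, e2, ih xs ys (by omega : k ≤ xs.length)]

lemma pv_rule3_eq_scan_rev : ∀ xs : List Char,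
    pvRule3A xs xs.length =
      pvScanA (fun c => PySem.Chars.lowerChar c ∈ (['i', 'u', 'ü'] : List Char))
        (PySem.List.enumerate xs 0).reverse := by
  intro xs
  induction xs using List.reverseRecOn with
  | nil => rfl
  | append_singleton xs x ih =>
    have hlen : (xs ++ [x]).length = xs.length + 1 := by simp
    rw [hlen]
    have henum : PySem.List.enumerate (xs ++ [x]) 0 =
        PySem.List.enumerate xs 0 ++ [((xs.length : Int), x)] := by
      rw [PySem.List.enumerate_append]
      simp [PySem.List.enumerate_cons, PySem.List.enumerate_nil]
    rw [henum]
    simp only [List.reverse_append, List.reverse_singleton, List.singleton_append, pvScanA]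
    simp only [pvRule3A]
    have e1 : PySem.List.pyGetD (xs ++ [x]) (xs.length : Int) ' ' = x := by
      rw [PySem.List.pyGetD_eq_getElem (xs ++ [x]) ' ' (by omega) (by simp)]
      simp only [Int.toNat_natCast]
      rw [List.getElem_append_right (by omega)]
      simp
    simp only [e1]
    rw [pv_rule3_prefix xs.length xs [x] (le_refl _)]
    rw [ih]
    split_ifs with h1 h2 <;> simp_all

lemma pv_toneIndex_eq (chars : List Char) :
    pvToneIndex chars =
      (if (if pvScanA (fun c => PySem.Chars.lowerChar c ∈ (['a', 'e'] : List Char)) (PySem.List.enumerate chars) = -1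
           then pvScanA (fun c => PySem.Chars.lowerChar c = 'o') (PySem.List.enumerate chars)
           else pvScanA (fun c => PySem.Chars.lowerChar c ∈ (['a', 'e'] : List Char)) (PySem.List.enumerate chars)) = -1
       then pvRule3A chars chars.length
       else (if pvScanA (fun c => PySem.Chars.lowerChar c ∈ (['a', 'e'] : List Char)) (PySem.List.enumerate chars) = -1
             then pvScanA (fun c => PySem.Chars.lowerChar c = 'o') (PySem.List.enumerate chars)
             else pvScanA (fun c => PySem.Chars.lowerChar c ∈ (['a', 'e'] : List Char)) (PySem.List.enumerate chars))) := by
  have h := pv_enum_nonneg chars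
  unfold pvToneIndex pvSelect
  rw [pv_fold_fst _ _ h, pv_fold_snd _ _ h, pv_fold_thd _ _ h, pv_rule3_eq_scan_rev]
  split_ifs <;> simp_all

lemma pv_body_eq (conv : List (List Char)) (syllable : List Char) :
    (if !syllable.isEmpty && PySem.Chars.isdigit (PySem.List.pyGetD syllable (-1) ' ') then
        let tone : Int := ((PySem.List.pyGetD syllable (-1) '0').toNat : Int) - 48
        let base := PySem.List.slice syllable none (some (-1))
        if tone = 5 ∨ tone = 0 then conv ++ [base]
        else
          let base_chars := PySem.Chars.replace (PySem.Chars.replace base ['v'] ['ü']) ['V'] ['Ü']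
          let tp1 := pvScanA (fun c => PySem.Chars.lowerChar c ∈ (['a', 'e'] : List Char))
                       (PySem.List.enumerate base_chars)
          let tp2 := if tp1 = -1 then
                       pvScanA (fun c => PySem.Chars.lowerChar c = 'o') (PySem.List.enumerate base_chars)
                     else tp1
          let tp3 := if tp2 = -1 then pvRule3A base_chars base_chars.length else tp2
          let base_chars' :=
            if tp3 ≠ -1 then
              match pvToneMarks (PySem.List.pyGetD base_chars tp3 ' ') with
              | some marks => base_chars.set tp3.toNat (PySem.List.pyGetD marks tone ' ')
              | none => base_chars
            else base_chars
          conv ++ [base_chars']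
      else conv ++ [syllable]) = conv ++ [pvConvertSyllable syllable] := by
  unfold pvConvertSyllable
  by_cases hg : (!syllable.isEmpty && PySem.Chars.isdigit (PySem.List.pyGetD syllable (-1) ' ')) = true
  · simp only [hg, if_pos, Bool.not_true, Bool.false_eq_true, if_false]
    rw [pv_toneIndex_eq]
    split_ifs <;> rfl
  · simp [hg]


-- ===== VERDICT (by name: the statement is the Claim_ definition above) =====
theorem numbered_to_accented_spec : Claim_equal_numbered_to_accented := by
  intro s _ _
  unfold Spec_numbered_to_accented numbered_to_accented numbered_to_accented_alt
  by_cases hs : s = ""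
  · simp [hs]
  · simp only [if_neg hs]
    congr 1
    rw [funext₂ pv_body_eq, PySem.List.foldl_append_singleton_eq_map]
    rfl
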